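-- pv_equiv track=rewrite | github.com/macho715/convert | AGI TR 1-6 Transportation Master Gantt Chart/AGI_TR_MultiScenario_Master_Gantt_upgraded.py | parse_voyage_pattern
-- ===== SOURCE A (Python) =====
-- def parse_voyage_pattern(pattern_str):
--     """
--     Parse voyage pattern like "1x1x1x1x1x1x1", "1-2-2-2", or "2-2-2-1" into TR groups.
--     """
--     if not pattern_str:
--         return [[i] for i in range(1, 8)]
--
--     voyage_groups = []
--     tr_id = 1
--
--     if "x" in pattern_str:
--         parts = pattern_str.split("x")
--     elif "-" in pattern_str:
--         parts = pattern_str.split("-")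
--     else:
--         parts = [pattern_str]
--
--     for part in parts:
--         part = part.strip()
--         if not part:
--             continue
--         try:
--             count = int(part)
--         except ValueError:
--             continue
--         if count <= 0:
--             continue
--         voyage_groups.append(list(range(tr_id, tr_id + count)))
--         tr_id += count
--
--     if not voyage_groups:
--         return [[i] for i in range(1, 8)]
--
--     return voyage_groups
-- ===== SOURCE B (Python) =====
-- def parse_voyage_pattern(pattern_str):
--     """Flat-pool version: carve one flat list of TR ids into slices, recursively."""
--     if not pattern_str:
--         return [[i] for i in range(1, 8)]
--
--     sep = "x" if "x" in pattern_str else "-" if "-" in pattern_str else None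
--     parts = pattern_str.split(sep) if sep is not None else [pattern_str]
--
--     counts = [c for c in (_to_count(p) for p in parts) if c is not None]
--     if not counts:
--         return [[i] for i in range(1, 8)]
--
--     pool = list(range(1, 1 + sum(counts)))
--     return _carve(pool, counts)
--
--
-- def _to_count(part):
--     part = part.strip()
--     if not part:
--         return None
--     try:
--         c = int(part)
--     except ValueError:
--         return None
--     return c if c > 0 else None
--
--
-- def _carve(pool, counts):
--     if not counts:
--         return []
--     c = counts[0]
--     return [pool[:c]] + _carve(pool[c:], counts[1:])
-- ===== Notes on version B (the rewrite author's own statement) =====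
-- stated objective: alternative
-- what changed: A emits each group from a running tr_id inside one accumulating fold; B instead builds one flat pool list(range(1, 1+sum(counts))) of all TR ids and recursively carves it into groups by slicing pool[:c] / pool[c:], with the counts extracted by a comprehension over a total helper.
import Mathlib
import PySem

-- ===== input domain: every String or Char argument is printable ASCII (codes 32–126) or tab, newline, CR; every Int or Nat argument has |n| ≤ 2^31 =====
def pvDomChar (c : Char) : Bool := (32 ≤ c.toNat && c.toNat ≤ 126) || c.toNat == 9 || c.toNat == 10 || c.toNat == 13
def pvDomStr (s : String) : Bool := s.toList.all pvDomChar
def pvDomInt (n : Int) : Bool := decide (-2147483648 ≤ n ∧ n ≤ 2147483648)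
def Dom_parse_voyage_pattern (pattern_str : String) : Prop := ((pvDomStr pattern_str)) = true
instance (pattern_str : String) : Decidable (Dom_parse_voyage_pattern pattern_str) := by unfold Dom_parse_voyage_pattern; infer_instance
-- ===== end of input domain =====

-- B replaces A's running-tr_id fold by building one flat pool of all TR ids (range(1, 1+sum))
-- and recursively carving it into groups by slicing; same values, different structure (alternative).

-- ===== PORT A =====
def parse_voyage_pattern (pattern_str : String) : List (List Int) :=
  if pattern_str = "" then (PySem.List.pyRange 1 8 1).map (fun i => [i])
  else
    let parts :=
      if PySem.Str.isIn "x" pattern_str then (PySem.Str.split? pattern_str "x").getD []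
      else if PySem.Str.isIn "-" pattern_str then (PySem.Str.split? pattern_str "-").getD []
      else [pattern_str]
    let st := parts.foldl (fun (st : List (List Int) × Int) part =>
      let p := PySem.Str.strip part
      if p = "" then st
      else
        match PySem.Int.ofStr? p with
        | none => st
        | some count =>
          if count ≤ 0 then st
          else (st.1 ++ [PySem.List.pyRange st.2 (st.2 + count) 1], st.2 + count)) ([], 1)
    if st.1 = [] then (PySem.List.pyRange 1 8 1).map (fun i => [i])
    else st.1

-- ===== PORT B =====
-- helper _to_count of Source B
def pvToCount (part : String) : Option Int :=
  let p := PySem.Str.strip part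
  if p = "" then none
  else
    match PySem.Int.ofStr? p with
    | none => none
    | some c => if c > 0 then some c else none

-- helper _carve of Source B: pool[:c] / pool[c:] are Python slices
def pvCarve (pool : List Int) : List Int → List (List Int)
  | [] => []
  | c :: cs => PySem.List.slice pool none (some c) :: pvCarve (PySem.List.slice pool (some c) none) cs

def parse_voyage_pattern_alt (pattern_str : String) : List (List Int) :=
  if pattern_str = "" then (PySem.List.pyRange 1 8 1).map (fun i => [i])
  else
    let parts :=
      if PySem.Str.isIn "x" pattern_str then (PySem.Str.split? pattern_str "x").getD []
      else if PySem.Str.isIn "-" pattern_str then (PySem.Str.split? pattern_str "-").getD []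
      else [pattern_str]
    let counts := parts.filterMap pvToCount
    if counts = [] then (PySem.List.pyRange 1 8 1).map (fun i => [i])
    else
      let pool := PySem.List.pyRange 1 (1 + counts.sum) 1
      pvCarve pool counts

-- ===== PRECONDITION & SPEC =====
def Spec_parse_voyage_pattern (pattern_str : String) (out : List (List Int)) : Prop := out = parse_voyage_pattern_alt pattern_str
instance (pattern_str : String) (out : List (List Int)) : Decidable (Spec_parse_voyage_pattern pattern_str out) := by unfold Spec_parse_voyage_pattern; infer_instance

-- ===== CLAIM (what is proved, stated in full; the proofs are below) =====
def Claim_equal_parse_voyage_pattern : Prop := ∀ (pattern_str : String), Dom_parse_voyage_pattern pattern_str → Spec_parse_voyage_pattern pattern_str (parse_voyage_pattern pattern_str)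

-- ===== LEMMAS AND PROOFS =====

/-- Groups A emits from start `t` for a list of counts. -/
def pvGroups (t : Int) : List Int → List (List Int)
  | [] => []
  | c :: cs => PySem.List.pyRange t (t + c) 1 :: pvGroups (t + c) cs

lemma foldA_eq (parts : List String) : ∀ (g : List (List Int)) (t : Int),
    parts.foldl (fun (st : List (List Int) × Int) part =>
      let p := PySem.Str.strip part
      if p = "" then st
      else
        match PySem.Int.ofStr? p with
        | none => st
        | some count =>
          if count ≤ 0 then st
          else (st.1 ++ [PySem.List.pyRange st.2 (st.2 + count) 1], st.2 + count)) (g, t)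
    = (g ++ pvGroups t (parts.filterMap pvToCount),
       t + (parts.filterMap pvToCount).sum) := by
  induction parts with
  | nil => intro g t; simp [pvGroups]
  | cons part rest ih =>
    intro g t
    simp only [List.foldl_cons, List.filterMap_cons]
    by_cases hp : PySem.Str.strip part = ""
    · have h0 : pvToCount part = none := by simp [pvToCount, hp]
      simp [hp, h0, ih]
    · cases h : PySem.Int.ofStr? (PySem.Str.strip part) with
      | none =>
        have h0 : pvToCount part = none := by simp [pvToCount, hp, h]
        simp [hp, h, h0, ih]
      | some c =>
        by_cases hc : c ≤ 0
        · have h0 : pvToCount part = none := by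
            have hng : ¬ c > 0 := by omega
            simp [pvToCount, hp, h, hng]
          simp [hp, h, hc, h0, ih]
        · have h0 : pvToCount part = some c := by
            have hg : c > 0 := by omega
            simp [pvToCount, hp, h, hg]
          simp [hp, h, hc, h0, ih, pvGroups]
          omega

lemma toCount_pos {part : String} {c : Int} (h : pvToCount part = some c) : 0 < c := by
  unfold pvToCount at h
  by_cases hp : PySem.Str.strip part = ""
  · simp [hp] at h
  · simp only [hp, if_false] at h
    cases h' : PySem.Int.ofStr? (PySem.Str.strip part) with
    | none => simp [h'] at h
    | some d =>
      simp only [h'] at h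
      by_cases hd : d > 0
      · simp [hd] at h; omega
      · simp [hd] at h

lemma counts_pos (parts : List String) : ∀ c ∈ parts.filterMap pvToCount, 0 < c := by
  intro c hc
  rcases List.mem_filterMap.mp hc with ⟨part, _, h⟩
  exact toCount_pos h

lemma take_pyRange (t b c : Int) (hc : 0 ≤ c) (hcb : t + c ≤ b) :
    (PySem.List.pyRange t b 1).take c.toNat = PySem.List.pyRange t (t + c) 1 := by
  rw [PySem.List.pyRange_one_append t (t + c) b (by omega) hcb]
  rw [List.take_append_of_le_length (by rw [PySem.List.length_pyRange_one]; omega)]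
  rw [List.take_of_length_le (by rw [PySem.List.length_pyRange_one]; omega)]

lemma drop_pyRange (t b c : Int) (hc : 0 ≤ c) (hcb : t + c ≤ b) :
    (PySem.List.pyRange t b 1).drop c.toNat = PySem.List.pyRange (t + c) b 1 := by
  rw [PySem.List.pyRange_one_append t (t + c) b (by omega) hcb]
  rw [List.drop_append_of_le_length (by rw [PySem.List.length_pyRange_one]; omega)]
  rw [List.drop_of_length_le (by rw [PySem.List.length_pyRange_one]; omega)]
  simp

lemma carve_eq_groups (counts : List Int) : ∀ (t b : Int),
    (∀ c ∈ counts, 0 < c) → t + counts.sum ≤ b →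
    pvCarve (PySem.List.pyRange t b 1) counts = pvGroups t counts := by
  induction counts with
  | nil => intro t b _ _; simp [pvCarve, pvGroups]
  | cons c cs ih =>
    intro t b hpos hb
    have hc : 0 < c := hpos c (List.mem_cons_self)
    have hsum : 0 ≤ cs.sum := by
      have := fun x hx => hpos x (List.mem_cons_of_mem c hx)
      exact List.sum_nonneg (fun x hx => le_of_lt (this x hx))
    simp only [List.sum_cons] at hb
    have hcb : t + c ≤ b := by omega
    unfold pvCarve pvGroups
    rw [PySem.List.slice_to _ (by omega), PySem.List.slice_from _ (by omega)]
    rw [take_pyRange t b c (by omega) hcb, drop_pyRange t b c (by omega) hcb]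
    rw [ih (t + c) b (fun x hx => hpos x (List.mem_cons_of_mem c hx)) (by omega)]

lemma pvGroups_eq_nil_iff (t : Int) (cs : List Int) : pvGroups t cs = [] ↔ cs = [] := by
  cases cs <;> simp [pvGroups]

-- ===== VERDICT (by name: the statement is the Claim_ definition above) =====
theorem parse_voyage_pattern_spec : Claim_equal_parse_voyage_pattern := by
  intro pattern_str _
  unfold Spec_parse_voyage_pattern parse_voyage_pattern parse_voyage_pattern_alt
  by_cases h : pattern_str = ""
  · simp [h]
  · simp only [h, if_false]
    set parts :=
      if PySem.Str.isIn "x" pattern_str then (PySem.Str.split? pattern_str "x").getD []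
      else if PySem.Str.isIn "-" pattern_str then (PySem.Str.split? pattern_str "-").getD []
      else [pattern_str] with hparts
    rw [foldA_eq]
    simp only [List.nil_append]
    by_cases hc : parts.filterMap pvToCount = []
    · simp [hc, pvGroups]
    · have hg : pvGroups 1 (parts.filterMap pvToCount) ≠ [] := by
        simpa [pvGroups_eq_nil_iff] using hc
      simp only [hg, hc, if_false]
      exact (carve_eq_groups (parts.filterMap pvToCount) 1 (1 + (parts.filterMap pvToCount).sum)
        (counts_pos parts) (by omega)).symm
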